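-- pv_equiv track=rewrite | github.com/manishslal/parlay-tracker | helpers/bet_parser.py | get_parlay_date_keys
-- ===== SOURCE A (Python) =====
-- from typing import Dict, List
--
-- def get_parlay_date_keys(bet: Dict) -> tuple:
--     """
--     Get sorting keys for a parlay based on leg dates.
--     Returns: (earliest_date, latest_date) for sorting
--
--     Sort order:
--     - Primary: earliest_date (ascending) - shows newer parlays first
--     - Secondary: latest_date (descending) - breaks ties by latest leg
--     """
--     legs = bet.get("legs", [])
--     if not legs:
--         # If no legs, use a default far-past date
--         return ("1900-01-01", "1900-01-01")
--
--     dates = []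
--     for leg in legs:
--         game_date = leg.get("game_date")
--         if game_date:
--             dates.append(game_date)
--
--     if not dates:
--         return ("1900-01-01", "1900-01-01")
--
--     earliest_date = min(dates)  # Earliest leg date (date option 2)
--     latest_date = max(dates)    # Latest leg date (date option 1)
--
--     return (earliest_date, latest_date)
-- ===== SOURCE B (Python) =====
-- def get_parlay_date_keys(bet):
--     """Single fused pass: track running earliest/latest instead of collecting a list and scanning it twice."""
--     earliest = None
--     latest = None
--     for leg in bet.get("legs", []):
--         game_date = leg.get("game_date")
--         if game_date:
--             if earliest is None or game_date < earliest:
--                 earliest = game_date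
--             if latest is None or game_date > latest:
--                 latest = game_date
--     if earliest is None:
--         return ("1900-01-01", "1900-01-01")
--     return (earliest, latest)
-- ===== Notes on version B (the rewrite author's own statement) =====
-- stated objective: simpler
-- what changed: Replaced the collect-into-a-list-then-min-then-max structure (with a separate empty-legs early return) by one fused pass that maintains running earliest/latest Options, with a single default-return check.
import Mathlib
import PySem

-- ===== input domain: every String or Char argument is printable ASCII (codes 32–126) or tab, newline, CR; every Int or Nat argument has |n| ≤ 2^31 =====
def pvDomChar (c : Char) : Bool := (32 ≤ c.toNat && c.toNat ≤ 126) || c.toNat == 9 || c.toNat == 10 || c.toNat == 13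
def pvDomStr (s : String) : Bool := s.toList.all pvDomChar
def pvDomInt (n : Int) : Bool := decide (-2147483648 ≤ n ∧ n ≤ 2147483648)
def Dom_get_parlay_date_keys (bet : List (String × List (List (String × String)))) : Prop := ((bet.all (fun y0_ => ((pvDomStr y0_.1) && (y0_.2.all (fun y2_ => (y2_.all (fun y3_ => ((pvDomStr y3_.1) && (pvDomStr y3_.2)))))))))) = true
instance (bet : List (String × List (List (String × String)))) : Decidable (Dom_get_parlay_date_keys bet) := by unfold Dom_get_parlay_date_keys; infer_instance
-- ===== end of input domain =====

-- B fuses A's collect-then-min-then-max into one pass with running earliest/latest; objective: simpler.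

-- ===== PORT A =====
-- the date-collecting loop body: append game_date when truthy (non-None, non-empty)
def pvCollectStep (acc : List String) (leg : List (String × String)) : List String :=
  match (PySem.Dict.mk leg).get? "game_date" with
  | some gd => if gd ≠ "" then acc ++ [gd] else acc
  | none => acc

def get_parlay_date_keys (bet : List (String × List (List (String × String)))) : String × String :=
  let legs := (PySem.Dict.mk bet).getD "legs" []
  if legs = [] then ("1900-01-01", "1900-01-01")
  else
    let dates := legs.foldl pvCollectStep []
    match dates with
    | [] => ("1900-01-01", "1900-01-01")
    | d :: rest => (rest.foldl min d, rest.foldl max d)  -- min(dates), max(dates): running min/max loop (PySem.List.min?_id_cons / max?_id_cons)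

-- ===== PORT B =====
-- one fused pass: update running earliest/latest when game_date is truthy
def pvFusedStep (st : Option String × Option String) (leg : List (String × String)) :
    Option String × Option String :=
  match (PySem.Dict.mk leg).get? "game_date" with
  | some gd =>
    if gd ≠ "" then
      ((match st.1 with
        | none => some gd
        | some e => if gd < e then some gd else some e),
       (match st.2 with
        | none => some gd
        | some l => if gd > l then some gd else some l))
    else st
  | none => st

def get_parlay_date_keys_alt (bet : List (String × List (List (String × String)))) : String × String :=
  let st := ((PySem.Dict.mk bet).getD "legs" []).foldl pvFusedStep (none, none)
  match st with
  | (some e, some l) => (e, l)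
  | _ => ("1900-01-01", "1900-01-01")

-- ===== PRECONDITION & SPEC =====
def Spec_get_parlay_date_keys (bet : List (String × List (List (String × String)))) (out : String × String) : Prop := out = get_parlay_date_keys_alt bet
instance (bet : List (String × List (List (String × String)))) (out : String × String) : Decidable (Spec_get_parlay_date_keys bet out) := by unfold Spec_get_parlay_date_keys; infer_instance

-- ===== CLAIM (what is proved, stated in full; the proofs are below) =====
def Claim_equal_get_parlay_date_keys : Prop := ∀ (bet : List (String × List (List (String × String)))), Dom_get_parlay_date_keys bet → Spec_get_parlay_date_keys bet (get_parlay_date_keys bet)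

-- ===== LEMMAS AND PROOFS =====

-- the pair of running extrema that B's state must equal after processing the dates collected so far
def pvPack (acc : List String) : Option String × Option String :=
  match acc with
  | [] => (none, none)
  | d :: rest => (some (rest.foldl min d), some (rest.foldl max d))

theorem pvPack_append (acc : List String) (x : String) :
    pvPack (acc ++ [x]) =
      ((match (pvPack acc).1 with
        | none => some x
        | some e => if x < e then some x else some e),
       (match (pvPack acc).2 with
        | none => some x
        | some l => if x > l then some x else some l)) := by
  cases acc with
  | nil => simp [pvPack]
  | cons d rest =>
    simp only [pvPack, List.cons_append, List.foldl_append, List.foldl]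
    refine Prod.ext ?_ ?_ <;> simp only
    · rcases lt_or_ge x (rest.foldl min d) with h | h
      · simp [h, min_eq_right (le_of_lt h)]
      · simp [not_lt.mpr h, min_eq_left h]
    · rcases lt_or_ge (rest.foldl max d) x with h | h
      · simp [h, max_eq_right (le_of_lt h)]
      · simp [not_lt.mpr h, max_eq_left h]

theorem pvFused_eq_pack (legs : List (List (String × String))) (acc : List String) :
    legs.foldl pvFusedStep (pvPack acc) = pvPack (legs.foldl pvCollectStep acc) := by
  induction legs generalizing acc with
  | nil => rfl
  | cons leg rest ih =>
    simp only [List.foldl]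
    have hstep : pvFusedStep (pvPack acc) leg = pvPack (pvCollectStep acc leg) := by
      unfold pvFusedStep pvCollectStep
      cases h : (PySem.Dict.mk leg).get? "game_date" with
      | none => rfl
      | some gd =>
        by_cases hgd : gd = ""
        · simp [hgd]
        · simp only [hgd, ne_eq, not_false_eq_true, if_true, pvPack_append]
    rw [hstep, ih]

-- ===== VERDICT (by name: the statement is the Claim_ definition above) =====
theorem get_parlay_date_keys_spec : Claim_equal_get_parlay_date_keys := by
  intro bet _
  unfold Spec_get_parlay_date_keys get_parlay_date_keys get_parlay_date_keys_alt
  have h := pvFused_eq_pack ((PySem.Dict.mk bet).getD "legs" []) []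
  simp only [pvPack] at h
  rw [h]
  by_cases hlegs : (PySem.Dict.mk bet).getD "legs" [] = []
  · simp [hlegs]
  · simp only [hlegs, if_false]
    cases ((PySem.Dict.mk bet).getD "legs" []).foldl pvCollectStep [] with
    | nil => rfl
    | cons d rest => rfl
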